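-- pv_equiv track=rewrite | github.com/subalterngames/talmudifier | py_doc_gen.py | get_file_description
-- ===== SOURCE A (Python) =====
-- def get_file_description(lines):
--     began_description = False
--     description = ""
--     for line in lines:
--         line = line.strip()
--         if line == '"""':
--             if began_description:
--                 description += "\n***\n\n"
--                 return description
--             else:
--                 began_description = True
--         else:
--             if began_description:
--                 description += line.strip() + "\n"
-- ===== SOURCE B (Python) =====
-- def _after_first_delim(xs):
--     for i, x in enumerate(xs):
--         if x == '"""':
--             return xs[i + 1:]
--     return None
--
--
-- def _before_first_delim(xs):
--     for i, x in enumerate(xs):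
--         if x == '"""':
--             return xs[:i]
--     return None
--
--
-- def get_file_description(lines):
--     stripped = [line.strip() for line in lines]
--     rest = _after_first_delim(stripped)
--     if rest is None:
--         return None
--     body = _before_first_delim(rest)
--     if body is None:
--         return None
--     return "".join(s + "\n" for s in body) + "\n***\n\n"
-- ===== Notes on version B (the rewrite author's own statement) =====
-- stated objective: simpler
-- what changed: Replaces A's single stateful scan with a boolean flag and string accumulator by a strip-all-then-split decomposition: find the suffix after the first delimiter line, take the prefix before the next delimiter, and join it.
import Mathlib
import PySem

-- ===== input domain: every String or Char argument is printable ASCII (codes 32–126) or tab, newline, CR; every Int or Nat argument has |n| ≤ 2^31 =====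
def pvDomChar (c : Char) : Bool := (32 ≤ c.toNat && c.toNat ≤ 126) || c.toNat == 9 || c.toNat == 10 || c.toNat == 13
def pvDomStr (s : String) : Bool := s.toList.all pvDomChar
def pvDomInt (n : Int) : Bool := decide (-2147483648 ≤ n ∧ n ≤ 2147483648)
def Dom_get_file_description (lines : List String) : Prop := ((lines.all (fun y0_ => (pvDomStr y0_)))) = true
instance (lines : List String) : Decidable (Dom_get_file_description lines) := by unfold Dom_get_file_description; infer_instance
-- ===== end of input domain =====

-- B replaces A's single stateful flag-and-accumulator scan by a simpler
-- strip-all-then-split-at-delimiters decomposition (same O(n) cost).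


-- ===== PORT A =====
-- the for-loop with early return, state (began_description, description)
def getFileDescLoop : List String → Bool → String → Option String
  | [], _, _ => none
  | l :: ls, began, desc =>
    let line := PySem.Str.strip l
    if line = "\"\"\"" then
      if began then some (desc ++ "\n***\n\n")
      else getFileDescLoop ls true desc
    else
      if began then getFileDescLoop ls began (desc ++ PySem.Str.strip line ++ "\n")
      else getFileDescLoop ls began desc

def get_file_description (lines : List String) : Option String :=
  getFileDescLoop lines false ""

-- ===== PORT B =====
-- _after_first_delim: the suffix after the first '"""' element, none if absent
def afterFirstDelim : List String → Option (List String)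
  | [] => none
  | x :: xs => if x = "\"\"\"" then some xs else afterFirstDelim xs

-- _before_first_delim: the prefix before the first '"""' element, none if absent
def beforeFirstDelim : List String → Option (List String)
  | [] => none
  | x :: xs => if x = "\"\"\"" then some [] else (beforeFirstDelim xs).map (x :: ·)

def get_file_description_alt (lines : List String) : Option String :=
  let stripped := lines.map PySem.Str.strip
  match afterFirstDelim stripped with
  | none => none
  | some rest =>
    match beforeFirstDelim rest with
    | none => none
    | some body =>
      some (body.foldl (fun acc s => acc ++ s ++ "\n") "" ++ "\n***\n\n")

-- ===== PRECONDITION & SPEC =====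
def Spec_get_file_description (lines : List String) (out : Option String) : Prop := out = get_file_description_alt lines
instance (lines : List String) (out : Option String) : Decidable (Spec_get_file_description lines out) := by unfold Spec_get_file_description; infer_instance

-- ===== CLAIM (what is proved, stated in full; the proofs are below) =====
def Claim_equal_get_file_description : Prop := ∀ (lines : List String), Dom_get_file_description lines → Spec_get_file_description lines (get_file_description lines)

-- ===== LEMMAS AND PROOFS =====

lemma chars_strip_idem (s : List Char) :
    PySem.Chars.strip (PySem.Chars.strip s) = PySem.Chars.strip s := by
  have hrw : ∀ m : List Char,
      PySem.Chars.rstrip m = List.rdropWhile PySem.Chars.isspace m := by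
    intro m; rfl
  simp only [PySem.Chars.strip, PySem.Chars.lstrip, hrw]
  have h1 : List.dropWhile PySem.Chars.isspace
      (List.rdropWhile PySem.Chars.isspace (List.dropWhile PySem.Chars.isspace s)) =
      List.rdropWhile PySem.Chars.isspace (List.dropWhile PySem.Chars.isspace s) := by
    rw [List.dropWhile_eq_self_iff]
    intro hl
    have hpre := List.rdropWhile_prefix PySem.Chars.isspace
      (List.dropWhile PySem.Chars.isspace s)
    have hlen : 0 < (List.dropWhile PySem.Chars.isspace s).length :=
      lt_of_lt_of_le hl hpre.length_le
    have hget := hpre.getElem (i := 0) hl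
    rw [hget]
    exact List.dropWhile_get_zero_not PySem.Chars.isspace s hlen
  rw [h1, List.rdropWhile_idempotent]

lemma str_strip_idem (s : String) :
    PySem.Str.strip (PySem.Str.strip s) = PySem.Str.strip s := by
  simp [PySem.Str.strip, chars_strip_idem]

-- once began_description is set, A collects exactly the stripped lines before the next delimiter
lemma phase2 (ls : List String) (desc : String) :
    getFileDescLoop ls true desc =
      (beforeFirstDelim (ls.map PySem.Str.strip)).map
        (fun body => body.foldl (fun acc s => acc ++ s ++ "\n") desc ++ "\n***\n\n") := by
  induction ls generalizing desc with
  | nil => rfl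
  | cons l ls ih =>
    simp only [getFileDescLoop, List.map_cons, beforeFirstDelim]
    by_cases h : PySem.Str.strip l = "\"\"\""
    · simp [h]
    · simp only [if_neg h]
      rw [str_strip_idem, ih]
      cases beforeFirstDelim (ls.map PySem.Str.strip) <;> simp [List.foldl]

-- before the first delimiter, A only scans forward
lemma phase1 (ls : List String) (desc : String) :
    getFileDescLoop ls false desc =
      match afterFirstDelim (ls.map PySem.Str.strip) with
      | none => none
      | some rest =>
        (beforeFirstDelim rest).map
          (fun body => body.foldl (fun acc s => acc ++ s ++ "\n") desc ++ "\n***\n\n") := by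
  induction ls with
  | nil => rfl
  | cons l ls ih =>
    simp only [getFileDescLoop, List.map_cons, afterFirstDelim]
    by_cases h : PySem.Str.strip l = "\"\"\""
    · simp only [if_pos h]
      exact phase2 ls desc
    · simp only [if_neg h]
      exact ih

-- ===== VERDICT (by name: the statement is the Claim_ definition above) =====
theorem get_file_description_spec : Claim_equal_get_file_description := by
  intro lines _
  unfold Spec_get_file_description get_file_description get_file_description_alt
  rw [phase1]
  cases h : afterFirstDelim (lines.map PySem.Str.strip) with
  | none => simp [h]
  | some rest =>
    cases h2 : beforeFirstDelim rest <;> simp [h, h2]
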